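-- pv_equiv track=rewrite | github.com/luziwen97/teacher_system_1018 | childgui_1.py | remove_repeat
-- ===== SOURCE A (Python) =====
-- def remove_repeat(sample_list):
--     new_list1 = []  # 用于存储无重复的所有姓名
--     new_list2 = []  # 用于存储有重复的所有姓名
--     name_list = []
--     for i in sample_list:
--         if i not in new_list1:
--             new_list1.append(i)
--             name_list.append(i)
--         else:
--             if i not in new_list2:
--                 new_list2.append(i)
--             else:
--                 pass
--     for i in new_list2:
--         name_list.remove(i)
--     return new_list1,new_list2,name_list
-- ===== SOURCE B (Python) =====
-- def remove_repeat(sample_list):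
--     # One counting pass over the list, then derive the three outputs:
--     # dict keys give first-occurrence order; the second pass emits an item
--     # exactly when its running count reaches 2 (second-occurrence order).
--     counts = {}
--     for x in sample_list:
--         counts[x] = counts.get(x, 0) + 1
--     new_list1 = list(counts)
--     name_list = [x for x in counts if counts[x] == 1]
--     seen = {}
--     new_list2 = []
--     for x in sample_list:
--         seen[x] = seen.get(x, 0) + 1
--         if seen[x] == 2:
--             new_list2.append(x)
--     return new_list1, new_list2, name_list
-- ===== Notes on version B (the rewrite author's own statement) =====
-- stated objective: faster
-- what changed: Replaces quadratic membership tests on growing lists and list.remove passes with one dict counting pass plus a second pass that emits items at their second occurrence; the unique/singleton lists are read off the dict.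
import Mathlib
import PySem

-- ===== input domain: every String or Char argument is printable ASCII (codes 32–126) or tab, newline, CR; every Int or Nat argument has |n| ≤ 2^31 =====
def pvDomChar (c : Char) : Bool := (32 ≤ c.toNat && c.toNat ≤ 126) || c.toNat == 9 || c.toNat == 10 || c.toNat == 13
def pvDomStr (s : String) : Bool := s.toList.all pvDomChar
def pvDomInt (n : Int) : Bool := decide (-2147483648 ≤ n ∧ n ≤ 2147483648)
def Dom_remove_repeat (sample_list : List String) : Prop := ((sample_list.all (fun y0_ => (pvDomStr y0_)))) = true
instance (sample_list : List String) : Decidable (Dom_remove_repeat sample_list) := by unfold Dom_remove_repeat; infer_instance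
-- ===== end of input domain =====

-- B replaces A's quadratic list-membership/remove passes with one dict counting pass
-- plus a second-occurrence emitting pass (objective: faster, asymptotic).


-- ===== PORT A =====
-- first loop: build (new_list1, new_list2, name_list)
def pvStepA (st : List String × List String × List String) (i : String) :
    List String × List String × List String :=
  if i ∈ st.1 then
    if i ∈ st.2.1 then st else (st.1, st.2.1 ++ [i], st.2.2)
  else (st.1 ++ [i], st.2.1, st.2.2 ++ [i])

def remove_repeat (sample_list : List String) : List String × List String × List String :=
  let st := sample_list.foldl pvStepA ([], [], [])
  -- second loop: for i in new_list2: name_list.remove(i).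
  -- list.remove raises ValueError when i is absent; here every i of new_list2 is still
  -- in name_list (proved below), so remove? is always some and the .getD arm is dead.
  let name_list := st.2.1.foldl (fun acc i => (PySem.List.remove? acc i).getD acc) st.2.2
  (st.1, st.2.1, name_list)

-- ===== PORT B =====
def pvStepB (st : PySem.Dict String Int × List String) (x : String) :
    PySem.Dict String Int × List String :=
  let seen := st.1.insert x (st.1.getD x 0 + 1)
  (seen, if seen.getD x 0 == 2 then st.2 ++ [x] else st.2)

def remove_repeat_alt (sample_list : List String) : List String × List String × List String :=
  let counts := sample_list.foldl (fun d x => d.insert x (d.getD x 0 + 1))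
    (PySem.Dict.empty : PySem.Dict String Int)
  let new_list1 := counts.keys
  let name_list := counts.keys.filter (fun x => counts.getD x 0 == 1)
  let p := sample_list.foldl pvStepB (PySem.Dict.empty, [])
  (new_list1, p.2, name_list)

-- ===== PRECONDITION & SPEC =====
def Spec_remove_repeat (sample_list : List String) (out : List String × List String × List String) : Prop := out = remove_repeat_alt sample_list
instance (sample_list : List String) (out : List String × List String × List String) : Decidable (Spec_remove_repeat sample_list out) := by unfold Spec_remove_repeat; infer_instance

-- ===== CLAIM (what is proved, stated in full; the proofs are below) =====
def Claim_equal_remove_repeat : Prop := ∀ (sample_list : List String), Dom_remove_repeat sample_list → Spec_remove_repeat sample_list (remove_repeat sample_list)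

-- ===== LEMMAS AND PROOFS =====

-- joint invariant of A's first loop and B's counting/emitting loop:
-- A's state is (dedup, second-occurrences, dedup); B's seen-dict holds each count,
-- and B's output holds exactly the items occurring at least twice.
theorem pv_loop_inv (l : List String) :
    l.foldl pvStepA ([], [], []) =
      (PySem.Set.ofList l, (l.foldl pvStepB (PySem.Dict.empty, [])).2, PySem.Set.ofList l)
    ∧ (∀ y, (l.foldl pvStepB (PySem.Dict.empty, [])).1.getD y 0 = (l.count y : Int))
    ∧ (∀ y, y ∈ (l.foldl pvStepB (PySem.Dict.empty, [])).2 ↔ 2 ≤ l.count y) := by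
  induction l using List.reverseRecOn with
  | nil => refine ⟨rfl, ?_, ?_⟩ <;> intro y <;> simp [PySem.Dict.getD_empty]
  | append_singleton l x ih =>
    obtain ⟨hA, hcnt, hmem⟩ := ih
    simp only [List.foldl_append, List.foldl_cons, List.foldl_nil]
    have hout : (pvStepB (l.foldl pvStepB (PySem.Dict.empty, [])) x).2
        = (if l.count x = 1 then (l.foldl pvStepB (PySem.Dict.empty, [])).2 ++ [x]
           else (l.foldl pvStepB (PySem.Dict.empty, [])).2) := by
      simp only [pvStepB, PySem.Dict.getD_insert_self, hcnt]
      by_cases hc : l.count x = 1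
      · simp [hc]
      · have : ((l.count x : Int) + 1 == 2) = false := by
          simp only [beq_eq_false_iff_ne, ne_eq]; omega
        simp [hc, this]
    refine ⟨?_, ?_, ?_⟩
    · -- A's state
      rw [hA, hout, PySem.Set.ofList_append_singleton]
      by_cases hxl : x ∈ l
      · have hxS : x ∈ PySem.Set.ofList l := (PySem.Set.mem_ofList l x).mpr hxl
        rw [PySem.Set.add_of_mem hxS]
        by_cases h2 : 2 ≤ l.count x
        · have hx2 : x ∈ (l.foldl pvStepB (PySem.Dict.empty, [])).2 := (hmem x).mpr h2
          have hc1 : ¬ l.count x = 1 := by omega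
          simp [pvStepA, hxS, hx2, hc1]
        · have hx2 : x ∉ (l.foldl pvStepB (PySem.Dict.empty, [])).2 :=
            fun h => h2 ((hmem x).mp h)
          have hc1 : l.count x = 1 := by
            have := List.one_le_count_iff.mpr hxl; omega
          simp [pvStepA, hxS, hx2, hc1]
      · have hxS : x ∉ PySem.Set.ofList l := fun h => hxl ((PySem.Set.mem_ofList l x).mp h)
        rw [PySem.Set.add_of_not_mem hxS]
        have hc0 : l.count x = 0 := List.count_eq_zero.mpr hxl
        simp [pvStepA, hxS, hc0]
    · -- B's seen-dict counts
      intro y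
      simp only [pvStepB, PySem.Dict.getD_insert, hcnt]
      by_cases hyx : y = x
      · subst hyx; simp [List.count_append]
      · have hxy : ¬ x = y := fun h => hyx h.symm
        simp [hyx, hxy, List.count_append]
    · -- B's output membership
      intro y
      rw [hout]
      by_cases hyx : y = x
      · subst hyx
        have h1 : (l ++ [y]).count y = l.count y + 1 := by simp [List.count_append]
        rw [h1]
        by_cases hc : l.count y = 1
        · simp [hc]
        · simp only [if_neg hc, hmem y]; omega
      · have hxy : ¬ x = y := fun h => hyx h.symm
        have h1 : (l ++ [x]).count y = l.count y := by
          simp [List.count_append, hxy]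
        rw [h1]
        split_ifs with hc
        · simp [hmem y, hyx]
        · exact hmem y

-- removing each element of rem once from a duplicate-free S filters rem out of S
theorem pv_remove_fold (rem S : List String) (hS : S.Nodup) :
    rem.foldl (fun acc i => (PySem.List.remove? acc i).getD acc) S
      = S.filter (fun x => !(decide (x ∈ rem))) := by
  induction rem generalizing S with
  | nil => simp
  | cons i rest ih =>
    have hstep : (PySem.List.remove? S i).getD S = S.filter (fun x => !(decide (x = i))) := by
      by_cases hi : i ∈ S
      · rw [PySem.List.remove?_eq_some_erase S i hi]
        simp only [Option.getD_some, List.Nodup.erase_eq_filter hS]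
        apply List.filter_congr
        intro z _
        simp [bne, beq_eq_decide]
      · rw [(PySem.List.remove?_eq_none_iff S i).mpr hi]
        symm
        apply List.filter_eq_self.mpr
        intro x hx
        simp only [Bool.not_eq_eq_eq_not, Bool.not_true, decide_eq_false_iff_not]
        exact fun h => hi (h ▸ hx)
    rw [List.foldl_cons, hstep, ih _ (List.Nodup.filter _ hS), List.filter_filter]
    apply List.filter_congr
    intro x _
    by_cases h1 : x = i <;> by_cases h2 : x ∈ rest <;> simp [h1, h2]

-- ===== VERDICT (by name: the statement is the Claim_ definition above) =====
theorem remove_repeat_spec : Claim_equal_remove_repeat := by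
  intro l _
  unfold Spec_remove_repeat
  obtain ⟨hA, hcnt, hmem⟩ := pv_loop_inv l
  simp only [remove_repeat, remove_repeat_alt, hA,
    PySem.Dict.foldl_insert_getD_add_one_eq_counter, PySem.Dict.keys_counter]
  refine Prod.ext rfl (Prod.ext rfl ?_)
  simp only
  rw [pv_remove_fold _ _ (PySem.Set.nodup_ofList l)]
  apply List.filter_congr
  intro x hx
  have hx1 : 1 ≤ l.count x := List.one_le_count_iff.mpr ((PySem.Set.mem_ofList l x).mp hx)
  rw [PySem.Dict.getD_counter]
  by_cases h2 : 2 ≤ l.count x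
  · have hin : x ∈ (l.foldl pvStepB (PySem.Dict.empty, [])).2 := (hmem x).mpr h2
    have : ((l.count x : Int) == 1) = false := by
      simp only [beq_eq_false_iff_ne, ne_eq]; omega
    simp [hin, this]
  · have hnot : x ∉ (l.foldl pvStepB (PySem.Dict.empty, [])).2 := fun h => h2 ((hmem x).mp h)
    have hc1 : l.count x = 1 := by omega
    simp [hnot, hc1]
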